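-- pv_equiv track=rewrite | github.com/ayeletavr/intro_to_CS | ex3/ex3.py | seven_boom
-- ===== SOURCE A (Python) =====
-- def seven_boom(n):
--     def int_list_to_str_list(str_list): #to convert from int to str
--         n = 0
--         while n < len(str_list):
--             str_list[n] = str(str_list[n])
--             n += 1
--         return (str_list)
--     seven_boom_range = range(1,n+1)
--     seven_boom_list = []
--     for i in seven_boom_range:
--         if i % 7 == 0:
--             i = "boom"
--             seven_boom_list.append(i)
--             continue
--         else:
--             str(i)
--             seven_boom_list.append(i)
--             continue
--     #ints are still ints n seven_boom_list:
--     seven_boom_list = int_list_to_str_list(seven_boom_list)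
--     return seven_boom_list
-- ===== SOURCE B (Python) =====
-- def seven_boom(n):
--     result = [str(i) for i in range(1, n + 1)]
--     result[6::7] = ["boom"] * (n // 7)
--     return result
-- ===== Notes on version B (the rewrite author's own statement) =====
-- stated objective: alternative
-- what changed: A builds the list element-by-element with a conditional in the loop (appending ints and 'boom' strings) and then runs a second index-based while-loop converting every element with str; B maps str over the whole range in one comprehension and then overwrites every 7th slot with 'boom' via the strided slice assignment result[6::7] = ['boom'] * (n // 7).
import Mathlib
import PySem

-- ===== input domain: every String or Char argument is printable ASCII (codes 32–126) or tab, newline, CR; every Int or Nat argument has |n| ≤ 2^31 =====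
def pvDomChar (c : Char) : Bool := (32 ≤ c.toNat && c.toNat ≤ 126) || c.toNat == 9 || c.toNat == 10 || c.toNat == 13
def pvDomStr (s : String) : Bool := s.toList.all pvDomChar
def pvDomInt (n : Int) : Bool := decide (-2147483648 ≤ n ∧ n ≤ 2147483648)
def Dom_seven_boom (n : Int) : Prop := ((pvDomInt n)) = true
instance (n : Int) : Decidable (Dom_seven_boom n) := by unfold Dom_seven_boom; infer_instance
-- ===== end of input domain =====

-- B replaces A's conditional append loop + int→str conversion pass by a full str-map followed by a
-- strided overwrite of every 7th slot (Python slice assignment); same cost, different decomposition.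

-- ===== PORT A =====
-- A's list holds both ints and the string "boom" before the conversion pass: modelled as Int ⊕ String.
-- int_list_to_str_list's while loop applies str to each element in order (str on a str is identity).
def sevenBoomConv : List (Int ⊕ String) → List String
  | [] => []
  | Sum.inl i :: rest => PySem.Int.toStr i :: sevenBoomConv rest
  | Sum.inr s :: rest => s :: sevenBoomConv rest

def seven_boom (n : Int) : List String :=
  let seven_boom_list := (PySem.List.pyRange 1 (n + 1) 1).foldl
    (fun acc i =>
      if PySem.Int.mod i 7 = 0 then acc ++ [(Sum.inr "boom" : Int ⊕ String)]
      else acc ++ [Sum.inl i]) []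
  sevenBoomConv seven_boom_list

-- ===== PORT B =====
-- result[6::7] = ["boom"] * (n // 7): the extended slice has exactly n // 7 positions (indices
-- 6, 13, …), equal to the length of the assigned list, so the assignment writes "boom" at exactly
-- every index ≡ 6 (mod 7); this index-walk is exact for that slice assignment.
def sevenBoomSliceAssign : Nat → List String → List String
  | _, [] => []
  | k, x :: xs => (if k % 7 = 6 then "boom" else x) :: sevenBoomSliceAssign (k + 1) xs

def seven_boom_alt (n : Int) : List String :=
  let result := (PySem.List.pyRange 1 (n + 1) 1).map PySem.Int.toStr
  sevenBoomSliceAssign 0 result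

-- ===== PRECONDITION & SPEC =====
def Spec_seven_boom (n : Int) (out : List String) : Prop := out = seven_boom_alt n
instance (n : Int) (out : List String) : Decidable (Spec_seven_boom n out) := by unfold Spec_seven_boom; infer_instance

-- ===== CLAIM (what is proved, stated in full; the proofs are below) =====
def Claim_equal_seven_boom : Prop := ∀ (n : Int), Dom_seven_boom n → Spec_seven_boom n (seven_boom n)

-- ===== LEMMAS AND PROOFS =====

-- the per-element result both programs produce at value i
def sevenBoomElem (i : Int) : String :=
  if PySem.Int.mod i 7 = 0 then "boom" else PySem.Int.toStr i

lemma sevenBoom_foldl_eq_map (l : List Int) (acc : List (Int ⊕ String)) :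
    l.foldl (fun acc i =>
      if PySem.Int.mod i 7 = 0 then acc ++ [(Sum.inr "boom" : Int ⊕ String)]
      else acc ++ [Sum.inl i]) acc
    = acc ++ l.map (fun i => if PySem.Int.mod i 7 = 0 then (Sum.inr "boom" : Int ⊕ String) else Sum.inl i) := by
  induction l generalizing acc with
  | nil => simp
  | cons x xs ih =>
    simp only [List.foldl_cons, List.map_cons]
    split <;> rw [ih] <;> simp

lemma sevenBoomConv_map (l : List Int) :
    sevenBoomConv (l.map (fun i => if PySem.Int.mod i 7 = 0 then (Sum.inr "boom" : Int ⊕ String) else Sum.inl i))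
    = l.map sevenBoomElem := by
  induction l with
  | nil => rfl
  | cons x xs ih =>
    simp only [List.map_cons]
    by_cases h : PySem.Int.mod x 7 = 0
    · rw [if_pos h]
      simp only [sevenBoomConv]
      rw [ih]
      unfold sevenBoomElem
      rw [if_pos h]
    · rw [if_neg h]
      simp only [sevenBoomConv]
      rw [ih]
      unfold sevenBoomElem
      rw [if_neg h]

lemma sevenBoom_A_map (n : Int) :
    seven_boom n = (PySem.List.pyRange 1 (n + 1) 1).map sevenBoomElem := by
  unfold seven_boom
  rw [sevenBoom_foldl_eq_map, List.nil_append, sevenBoomConv_map]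

lemma sevenBoomSliceAssign_pyRange (m : Nat) :
    ∀ (a : Int) (k : Nat), a % 7 = ((k + 1 : Nat) % 7 : Nat) →
    sevenBoomSliceAssign k ((PySem.List.pyRange a (a + m) 1).map PySem.Int.toStr)
    = (PySem.List.pyRange a (a + m) 1).map sevenBoomElem := by
  induction m with
  | zero =>
    intro a k _
    rw [PySem.List.pyRange_one_eq_nil (by omega)]
    rfl
  | succ m ih =>
    intro a k hk
    rw [PySem.List.pyRange_one_cons (by omega)]
    have h7 : PySem.Int.mod a 7 = a % 7 := PySem.Int.mod_eq_emod_of_pos (by omega)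
    have hcond : (k % 7 = 6) ↔ (PySem.Int.mod a 7 = 0) := by
      rw [h7]; omega
    have harg : a + (m + 1 : Nat) = (a + 1) + (m : Nat) := by push_cast; ring
    simp only [List.map_cons, sevenBoomSliceAssign, sevenBoomElem]
    rw [harg, ih (a + 1) (k + 1) (by omega)]
    congr 1
    by_cases h : PySem.Int.mod a 7 = 0
    · rw [if_pos (hcond.mpr h), if_pos h]
    · rw [if_neg (fun hh => h (hcond.mp hh)), if_neg h]

lemma sevenBoom_B_map (n : Int) :
    seven_boom_alt n = (PySem.List.pyRange 1 (n + 1) 1).map sevenBoomElem := by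
  unfold seven_boom_alt
  by_cases hn : 0 ≤ n
  · have h : n + 1 = (1 : Int) + (n.toNat : Nat) := by omega
    rw [h]
    exact sevenBoomSliceAssign_pyRange n.toNat 1 0 (by omega)
  · rw [PySem.List.pyRange_one_eq_nil (by omega)]
    rfl

-- ===== VERDICT (by name: the statement is the Claim_ definition above) =====
theorem seven_boom_spec : Claim_equal_seven_boom := by
  intro n _
  unfold Spec_seven_boom
  rw [sevenBoom_A_map, sevenBoom_B_map]
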